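-- pv_equiv track=rewrite | github.com/MikeSingularity/icarus-consumables | tests/test_tier_assignment.py | get_tier_from_recipe_sets
-- ===== SOURCE A (Python) =====
-- CRAFTING_BENCH_TIERS = {
--     # Tier 0: Handcrafted or gathered (no specific crafting bench)
--     0: ["None"],
--
--     # Tier 1: Basic cooking and crafting
--     1: ["Campfire", "Firepit", "Character", "Drying_Rack"],
--
--     # Tier 2: Intermediate cooking and crafting
--     2: ["PotBellyStove", "Cooking_Station", "T3_Smoker"],
--
--     # Tier 3: Advanced cooking and crafting
--     3: ["Kitchen_Stove", "Kitchen_Bench", "T4_Smoker", "Seed_Extractor"],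
--
--     # Tier 4: High-end cooking and crafting
--     4: ["Electric_Stove", "Advanced_Kitchen_Bench", "Butchery_Bench", "Herbalism_Bench", "Animal_Bench", "Machining_Bench", "Fabricator", "Manufacturer", "Carpentry_Bench", "Carpentry_Bench_T4", "Masonry_Bench", "Masonry_Bench_T3", "Masonry_Bench_T4", "Cement_Mixer", "Glassworking_Bench"]
-- }
--
-- def get_tier_from_recipe_sets(recipe_sets):
--     if not recipe_sets:
--         return "0"
--
--     lowest_tier = 4
--     for tier, benches in CRAFTING_BENCH_TIERS.items():
--         for bench in benches:
--             if any(bench == recipe_set for recipe_set in recipe_sets):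
--                 if tier < lowest_tier:
--                     lowest_tier = tier
--
--     return str(lowest_tier)
-- ===== SOURCE B (Python) =====
-- # Flat reverse lookup table written out directly: bench name -> tier.
-- BENCH_TO_TIER = {
--     "None": 0,
--     "Campfire": 1, "Firepit": 1, "Character": 1, "Drying_Rack": 1,
--     "PotBellyStove": 2, "Cooking_Station": 2, "T3_Smoker": 2,
--     "Kitchen_Stove": 3, "Kitchen_Bench": 3, "T4_Smoker": 3, "Seed_Extractor": 3,
--     "Electric_Stove": 4, "Advanced_Kitchen_Bench": 4, "Butchery_Bench": 4,
--     "Herbalism_Bench": 4, "Animal_Bench": 4, "Machining_Bench": 4,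
--     "Fabricator": 4, "Manufacturer": 4, "Carpentry_Bench": 4,
--     "Carpentry_Bench_T4": 4, "Masonry_Bench": 4, "Masonry_Bench_T3": 4,
--     "Masonry_Bench_T4": 4, "Cement_Mixer": 4, "Glassworking_Bench": 4,
-- }
--
-- def get_tier_from_recipe_sets(recipe_sets):
--     if not recipe_sets:
--         return "0"
--     return str(min((BENCH_TO_TIER[r] for r in recipe_sets if r in BENCH_TO_TIER), default=4))
-- ===== Notes on version B (the rewrite author's own statement) =====
-- stated objective: faster
-- what changed: A scans the whole recipe_sets list once per bench of every tier of the nested table; B keeps a flat bench->tier dict and takes the min over a single pass of recipe_sets with default 4 (keeping the empty-input '0' case).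
import Mathlib
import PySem

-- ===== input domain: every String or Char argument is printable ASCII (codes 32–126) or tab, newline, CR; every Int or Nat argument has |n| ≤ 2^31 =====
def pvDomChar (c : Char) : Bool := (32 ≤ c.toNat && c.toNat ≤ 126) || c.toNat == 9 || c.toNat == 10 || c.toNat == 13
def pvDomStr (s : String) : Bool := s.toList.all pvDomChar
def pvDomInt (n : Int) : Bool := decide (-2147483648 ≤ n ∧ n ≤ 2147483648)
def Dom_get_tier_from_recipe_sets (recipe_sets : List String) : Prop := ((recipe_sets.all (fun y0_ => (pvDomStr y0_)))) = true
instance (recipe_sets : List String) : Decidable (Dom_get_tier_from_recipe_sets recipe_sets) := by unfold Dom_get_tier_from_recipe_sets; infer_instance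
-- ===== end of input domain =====

-- B replaces A's nested per-bench scans of the input list by a flat bench→tier dict and one min-pass over the input (objective: faster by a constant factor).

-- ===== PORT A =====
-- CRAFTING_BENCH_TIERS as an insertion-ordered association list (dict iterated via .items()).
def CRAFTING_BENCH_TIERS : List (Int × List String) :=
  [(0, ["None"]),
   (1, ["Campfire", "Firepit", "Character", "Drying_Rack"]),
   (2, ["PotBellyStove", "Cooking_Station", "T3_Smoker"]),
   (3, ["Kitchen_Stove", "Kitchen_Bench", "T4_Smoker", "Seed_Extractor"]),
   (4, ["Electric_Stove", "Advanced_Kitchen_Bench", "Butchery_Bench", "Herbalism_Bench", "Animal_Bench", "Machining_Bench", "Fabricator", "Manufacturer", "Carpentry_Bench", "Carpentry_Bench_T4", "Masonry_Bench", "Masonry_Bench_T3", "Masonry_Bench_T4", "Cement_Mixer", "Glassworking_Bench"])]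

def get_tier_from_recipe_sets (recipe_sets : List String) : String :=
  match recipe_sets with
  | [] => "0"
  | _ =>
    let lowest_tier : Int :=
      CRAFTING_BENCH_TIERS.foldl (fun lowest tb =>
        tb.2.foldl (fun lowest bench =>
          if recipe_sets.any (fun recipe_set => bench == recipe_set) then
            if tb.1 < lowest then tb.1 else lowest
          else lowest) lowest) 4
    PySem.Int.toStr lowest_tier

-- ===== PORT B =====
-- Source B's flat literal dict bench → tier (a Python dict literal)
def BENCH_TO_TIER : PySem.Dict String Int :=
  PySem.Dict.ofList
    [("None", 0),
     ("Campfire", 1), ("Firepit", 1), ("Character", 1), ("Drying_Rack", 1),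
     ("PotBellyStove", 2), ("Cooking_Station", 2), ("T3_Smoker", 2),
     ("Kitchen_Stove", 3), ("Kitchen_Bench", 3), ("T4_Smoker", 3), ("Seed_Extractor", 3),
     ("Electric_Stove", 4), ("Advanced_Kitchen_Bench", 4), ("Butchery_Bench", 4),
     ("Herbalism_Bench", 4), ("Animal_Bench", 4), ("Machining_Bench", 4),
     ("Fabricator", 4), ("Manufacturer", 4), ("Carpentry_Bench", 4),
     ("Carpentry_Bench_T4", 4), ("Masonry_Bench", 4), ("Masonry_Bench_T3", 4),
     ("Masonry_Bench_T4", 4), ("Cement_Mixer", 4), ("Glassworking_Bench", 4)]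

def get_tier_from_recipe_sets_alt (recipe_sets : List String) : String :=
  if recipe_sets.isEmpty then "0"
  else
    -- min((BENCH_TO_TIER[r] for r in recipe_sets if r in BENCH_TO_TIER), default=4)
    PySem.Int.toStr ((recipe_sets.filterMap (fun r => BENCH_TO_TIER.get? r)).foldl min 4)

-- ===== PRECONDITION & SPEC =====
def Spec_get_tier_from_recipe_sets (recipe_sets : List String) (out : String) : Prop := out = get_tier_from_recipe_sets_alt recipe_sets
instance (recipe_sets : List String) (out : String) : Decidable (Spec_get_tier_from_recipe_sets recipe_sets out) := by unfold Spec_get_tier_from_recipe_sets; infer_instance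

-- ===== CLAIM (what is proved, stated in full; the proofs are below) =====
def Claim_equal_get_tier_from_recipe_sets : Prop := ∀ (recipe_sets : List String), Dom_get_tier_from_recipe_sets recipe_sets → Spec_get_tier_from_recipe_sets recipe_sets (get_tier_from_recipe_sets recipe_sets)

-- ===== LEMMAS AND PROOFS =====

-- tiers contributed by the matched benches of the table, flattened
def matchedTiers (rs : List String) : List Int :=
  CRAFTING_BENCH_TIERS.flatMap (fun tb =>
    (tb.2.filter (fun bench => rs.any (fun r => bench == r))).map (fun _ => tb.1))

-- A's inner per-tier loop computes a min-fold over the matched benches of that tier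
theorem innerA_eq_min_fold (rs : List String) (t : Int) (bs : List String) (acc : Int) :
    bs.foldl (fun lowest bench =>
      if rs.any (fun r => bench == r) then
        if t < lowest then t else lowest
      else lowest) acc
    = ((bs.filter (fun bench => rs.any (fun r => bench == r))).map (fun _ => t)).foldl min acc := by
  induction bs generalizing acc with
  | nil => rfl
  | cons b bs ih =>
    by_cases h : rs.any (fun r => b == r)
    · simp only [List.foldl_cons, List.filter_cons, h, if_true, List.map_cons, ih]
      congr 1
      rw [min_def]
      split_ifs <;> omega
    · simp only [List.foldl_cons, List.filter_cons, h, Bool.false_eq_true, if_false, ih]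

theorem outerA_gen (rs : List String) (P : List (Int × List String)) (acc : Int) :
    P.foldl (fun lowest tb =>
      tb.2.foldl (fun lowest bench =>
        if rs.any (fun r => bench == r) then
          if tb.1 < lowest then tb.1 else lowest
        else lowest) lowest) acc
    = (P.flatMap (fun tb =>
        (tb.2.filter (fun bench => rs.any (fun r => bench == r))).map (fun _ => tb.1))).foldl min acc := by
  induction P generalizing acc with
  | nil => rfl
  | cons tb P ih =>
    rw [List.foldl_cons, List.flatMap_cons, List.foldl_append, ih, innerA_eq_min_fold]

theorem outerA_eq_min_fold (rs : List String) :
    CRAFTING_BENCH_TIERS.foldl (fun lowest tb =>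
      tb.2.foldl (fun lowest bench =>
        if rs.any (fun r => bench == r) then
          if tb.1 < lowest then tb.1 else lowest
        else lowest) lowest) 4
    = (matchedTiers rs).foldl min 4 := by
  unfold matchedTiers
  exact outerA_gen rs CRAFTING_BENCH_TIERS 4

-- min-fold facts
theorem foldl_min_le_init {α : Type} [LinearOrder α] (a : α) (l : List α) : l.foldl min a ≤ a := by
  induction l generalizing a with
  | nil => simp
  | cons x l ih => exact le_trans (ih (min a x)) (min_le_left a x)

theorem foldl_min_le_mem {α : Type} [LinearOrder α] (a : α) (l : List α) (x : α) (hx : x ∈ l) :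
    l.foldl min a ≤ x := by
  induction l generalizing a with
  | nil => cases hx
  | cons y l ih =>
    rw [List.foldl_cons]
    cases hx with
    | head => exact le_trans (foldl_min_le_init (min a x) l) (min_le_right a x)
    | tail _ hx => exact ih (min a y) hx

theorem foldl_min_eq_or_mem {α : Type} [LinearOrder α] (a : α) (l : List α) :
    l.foldl min a = a ∨ l.foldl min a ∈ l := by
  induction l generalizing a with
  | nil => left; rfl
  | cons x l ih =>
    rcases ih (min a x) with h | h
    · rcases min_cases a x with ⟨he, _⟩ | ⟨he, _⟩
      · left; rw [List.foldl_cons, h, he]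
      · right; rw [List.foldl_cons, h, he]; exact List.mem_cons_self
    · right; exact List.mem_cons_of_mem x h

theorem foldl_min_eq_of_mem_iff {α : Type} [LinearOrder α] (a : α) (xs ys : List α)
    (h : ∀ x, x ∈ xs ↔ x ∈ ys) : xs.foldl min a = ys.foldl min a := by
  apply le_antisymm
  · rcases foldl_min_eq_or_mem a ys with he | hm
    · rw [he]; exact foldl_min_le_init a xs
    · exact foldl_min_le_mem a xs _ ((h _).mpr hm)
  · rcases foldl_min_eq_or_mem a xs with he | hm
    · rw [he]; exact foldl_min_le_init a ys
    · exact foldl_min_le_mem a ys _ ((h _).mp hm)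

-- the flat dict agrees with A's grouped table
set_option maxHeartbeats 2000000 in
theorem get?_BENCH_TO_TIER (r : String) (t : Int) :
    BENCH_TO_TIER.get? r = some t ↔ ∃ tb ∈ CRAFTING_BENCH_TIERS, r ∈ tb.2 ∧ t = tb.1 := by
  rw [PySem.Dict.get?_eq_some_iff_mem_items BENCH_TO_TIER r t (by decide)]
  rw [show BENCH_TO_TIER.items
        = CRAFTING_BENCH_TIERS.flatMap (fun tb => tb.2.map (fun b => (b, tb.1))) from by rfl]
  simp only [List.mem_flatMap, List.mem_map]
  constructor
  · rintro ⟨tb, htb, b, hb, heq⟩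
    cases heq
    exact ⟨tb, htb, hb, rfl⟩
  · rintro ⟨tb, htb, hb, rfl⟩
    exact ⟨tb, htb, r, hb, rfl⟩

theorem mem_matchedTiers_iff (rs : List String) (t : Int) :
    t ∈ matchedTiers rs ↔ t ∈ rs.filterMap (fun r => BENCH_TO_TIER.get? r) := by
  simp only [matchedTiers, List.mem_flatMap, List.mem_map, List.mem_filter, List.mem_filterMap,
    List.any_eq_true, beq_iff_eq, get?_BENCH_TO_TIER]
  constructor
  · rintro ⟨tb, htb, b, ⟨⟨hb, r, hr, rfl⟩, rfl⟩⟩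
    exact ⟨b, hr, tb, htb, hb, rfl⟩
  · rintro ⟨r, hr, tb, htb, hb, rfl⟩
    exact ⟨tb, htb, r, ⟨⟨hb, r, hr, rfl⟩, rfl⟩⟩

-- ===== VERDICT (by name: the statement is the Claim_ definition above) =====
theorem get_tier_from_recipe_sets_spec : Claim_equal_get_tier_from_recipe_sets := by
  intro rs _
  unfold Spec_get_tier_from_recipe_sets get_tier_from_recipe_sets get_tier_from_recipe_sets_alt
  cases rs with
  | nil => rfl
  | cons r rs =>
    simp only [outerA_eq_min_fold, List.isEmpty_cons, if_neg Bool.false_ne_true]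
    rw [foldl_min_eq_of_mem_iff _ _ _ (mem_matchedTiers_iff (r :: rs))]
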